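-- pv_equiv track=rewrite | github.com/nguyeho7/CZ_NER | src/common/NER_utils.py | line_split
-- ===== SOURCE A (Python) =====
-- def line_split(line):
--     '''
--     a split according to space characters that considers tags in <> brackets as one word
--     also works with embedded tags i.e. <s <ps kote>> will be one word
--     '''
--     in_tag = 0
--     current = -1
--     for i, ch in enumerate(line):
--         if ch == '<':
--             in_tag += 1
--         elif ch == '>':
--             in_tag -= 1
--         if ch.isspace() and in_tag==0:
--             yield line[current+1:i]
--             current = i
--         if i==len(line)-1:
--             yield line[current+1:i+1]
--             current = i
-- ===== SOURCE B (Python) =====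
-- def line_split(line):
--     '''
--     a split according to space characters that considers tags in <> brackets as one word
--     also works with embedded tags i.e. <s <ps kote>> will be one word
--     '''
--     if not line:
--         return
--     depth = 0
--     bounds = []
--     for i, ch in enumerate(line):
--         if ch == '<':
--             depth += 1
--         elif ch == '>':
--             depth -= 1
--         if ch.isspace() and depth == 0:
--             bounds.append(i)
--     prev = -1
--     for b in bounds:
--         yield line[prev+1:b]
--         prev = b
--     yield line[prev+1:]
-- ===== Notes on version B (the rewrite author's own statement) =====
-- stated objective: alternative
-- what changed: B replaces A's single interleaved yield-as-you-go scan (which slices at every depth-0 whitespace and again at the last index) with two passes: first collect the depth-0 whitespace boundary indices, then slice the line between consecutive boundaries with a final tail slice.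
import Mathlib
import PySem

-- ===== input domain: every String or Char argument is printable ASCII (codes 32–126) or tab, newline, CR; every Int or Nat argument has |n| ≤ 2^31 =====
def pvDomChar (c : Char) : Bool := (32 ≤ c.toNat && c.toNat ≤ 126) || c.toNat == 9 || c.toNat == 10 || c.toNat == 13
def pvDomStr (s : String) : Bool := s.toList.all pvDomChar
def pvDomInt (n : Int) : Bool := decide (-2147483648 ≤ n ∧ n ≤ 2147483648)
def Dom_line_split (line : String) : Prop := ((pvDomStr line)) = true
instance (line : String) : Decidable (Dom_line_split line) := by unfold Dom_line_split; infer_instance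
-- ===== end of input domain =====

-- B replaces A's single interleaved yield-as-you-go scan with two passes: collect the
-- depth-0 whitespace boundary indices, then slice between consecutive boundaries
-- (objective: alternative decomposition, similar cost).

-- ===== PORT A =====
-- depth update shared by both scans: '<' increments, '>' decrements
def pvUpd (d : Int) (ch : Char) : Int :=
  if ch == '<' then d + 1 else if ch == '>' then d - 1 else d

-- loop body of A: state (in_tag, current, yielded-so-far)
def pvStepA (cs : List Char) (n : Int) (st : Int × Int × List String) (p : Int × Char) :
    Int × Int × List String :=
  let in_tag := pvUpd st.1 p.2
  let st1 : Int × List String :=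
    if PySem.Chars.isspace p.2 && in_tag == 0 then
      (p.1, st.2.2 ++ [String.ofList (PySem.List.slice cs (some (st.2.1 + 1)) (some p.1))])
    else (st.2.1, st.2.2)
  let st2 : Int × List String :=
    if p.1 == n - 1 then
      (p.1, st1.2 ++ [String.ofList (PySem.List.slice cs (some (st1.1 + 1)) (some (p.1 + 1)))])
    else st1
  (in_tag, st2)

def line_split (line : String) : List String :=
  let cs := line.toList
  let n : Int := cs.length
  ((PySem.List.enumerate cs 0).foldl (pvStepA cs n) (0, -1, [])).2.2

-- ===== PORT B =====
-- first pass: collect indices of depth-0 whitespace; state (depth, bounds)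
def pvStepB1 (st : Int × List Int) (p : Int × Char) : Int × List Int :=
  let depth := pvUpd st.1 p.2
  (depth, if PySem.Chars.isspace p.2 && depth == 0 then st.2 ++ [p.1] else st.2)

-- second pass: slice between consecutive boundaries; state (prev, out)
def pvStepB2 (cs : List Char) (st : Int × List String) (b : Int) : Int × List String :=
  (b, st.2 ++ [String.ofList (PySem.List.slice cs (some (st.1 + 1)) (some b))])

def line_split_alt (line : String) : List String :=
  let cs := line.toList
  if cs.isEmpty then []
  else
    let bounds := ((PySem.List.enumerate cs 0).foldl pvStepB1 (0, [])).2
    let fin := bounds.foldl (pvStepB2 cs) (-1, [])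
    fin.2 ++ [String.ofList (PySem.List.slice cs (some (fin.1 + 1)) none)]

-- ===== PRECONDITION & SPEC =====
def Spec_line_split (line : String) (out : List String) : Prop := out = line_split_alt line
instance (line : String) (out : List String) : Decidable (Spec_line_split line out) := by unfold Spec_line_split; infer_instance

-- ===== CLAIM (what is proved, stated in full; the proofs are below) =====
def Claim_equal_line_split : Prop := ∀ (line : String), Dom_line_split line → Spec_line_split line (line_split line)

-- ===== LEMMAS AND PROOFS =====

-- spec-level boundary list of an enumerated suffix, starting at depth d
def pvBounds (d : Int) : List (Int × Char) → List Int
  | [] => []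
  | p :: rest =>
      let d' := pvUpd d p.2
      (if PySem.Chars.isspace p.2 && d' == 0 then [p.1] else []) ++ pvBounds d' rest

def pvDepth (d : Int) : List (Int × Char) → Int
  | [] => d
  | p :: rest => pvDepth (pvUpd d p.2) rest

-- the slices between consecutive boundaries, previous boundary prev
def pvRender (cs : List Char) (prev : Int) : List Int → List String
  | [] => []
  | b :: bs => String.ofList (PySem.List.slice cs (some (prev + 1)) (some b)) :: pvRender cs b bs

def pvLastP (prev : Int) : List Int → Int
  | [] => prev
  | b :: bs => pvLastP b bs

theorem pvB1_fold (l : List (Int × Char)) (d : Int) (bs : List Int) :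
    l.foldl pvStepB1 (d, bs) = (pvDepth d l, bs ++ pvBounds d l) := by
  induction l generalizing d bs with
  | nil => simp [pvDepth, pvBounds]
  | cons p rest ih =>
      simp only [List.foldl_cons, pvStepB1, pvBounds, pvDepth]
      rw [ih]
      split <;> simp

theorem pvB2_fold (cs : List Char) (bs : List Int) (prev : Int) (out : List String) :
    bs.foldl (pvStepB2 cs) (prev, out) = (pvLastP prev bs, out ++ pvRender cs prev bs) := by
  induction bs generalizing prev out with
  | nil => simp [pvLastP, pvRender]
  | cons b rest ih =>
      simp only [List.foldl_cons, pvStepB2, pvLastP, pvRender]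
      rw [ih]; simp

theorem pvA_fold (cs : List Char) (n : Int) : ∀ (l : List (Int × Char)) (t c : Int)
    (out : List String), (∀ p ∈ l, p.1 ≠ n - 1) →
    l.foldl (pvStepA cs n) (t, c, out) =
      (pvDepth t l, pvLastP c (pvBounds t l), out ++ pvRender cs c (pvBounds t l)) := by
  intro l
  induction l with
  | nil => intro t c out _; simp [pvDepth, pvBounds, pvLastP, pvRender]
  | cons p rest ih =>
      intro t c out h
      have hp : p.1 ≠ n - 1 := h p (List.mem_cons_self ..)
      simp only [List.foldl_cons, pvStepA, pvBounds, pvDepth]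
      have hne : (p.1 == n - 1) = false := by simp [hp]
      by_cases hs : (PySem.Chars.isspace p.2 && pvUpd t p.2 == 0) = true
      · simp only [hs, if_pos, hne, Bool.false_eq_true, if_false]
        rw [ih _ _ _ (fun q hq => h q (List.mem_cons_of_mem _ hq))]
        simp [pvLastP, pvRender]
      · simp only [hs, hne, Bool.false_eq_true, if_false]
        rw [ih _ _ _ (fun q hq => h q (List.mem_cons_of_mem _ hq))]
        simp

theorem pvRender_append (cs : List Char) (prev b : Int) (bs : List Int) :
    pvRender cs prev (bs ++ [b]) =
      pvRender cs prev bs ++ [String.ofList (PySem.List.slice cs (some (pvLastP prev bs + 1)) (some b))] := by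
  induction bs generalizing prev with
  | nil => simp [pvRender, pvLastP]
  | cons x rest ih => simp [pvRender, pvLastP, ih]

theorem pvLastP_append (prev b : Int) (bs : List Int) : pvLastP prev (bs ++ [b]) = b := by
  induction bs generalizing prev with
  | nil => rfl
  | cons x rest ih => simp [pvLastP, ih]

theorem pvBounds_nonneg (l : List (Int × Char)) (d : Int) (h : ∀ p ∈ l, 0 ≤ p.1) :
    ∀ b ∈ pvBounds d l, 0 ≤ b := by
  induction l generalizing d with
  | nil => simp [pvBounds]
  | cons p rest ih =>
      intro b hb
      simp only [pvBounds, List.mem_append] at hb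
      rcases hb with hb | hb
      · rcases (by split at hb <;> simp_all : b = p.1) with rfl
        exact h p (List.mem_cons_self ..)
      · exact ih _ (fun q hq => h q (List.mem_cons_of_mem _ hq)) b hb

theorem pvLastP_ge (prev : Int) (bs : List Int) (hprev : -1 ≤ prev) (h : ∀ b ∈ bs, 0 ≤ b) :
    -1 ≤ pvLastP prev bs := by
  induction bs generalizing prev with
  | nil => exact hprev
  | cons b rest ih =>
      exact ih b (by linarith [h b (List.mem_cons_self ..)]) (fun q hq => h q (List.mem_cons_of_mem _ hq))

theorem pvBounds_append (l : List (Int × Char)) (p : Int × Char) (d : Int) :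
    pvBounds d (l ++ [p]) = pvBounds d l ++
      (if PySem.Chars.isspace p.2 && pvUpd (pvDepth d l) p.2 == 0 then [p.1] else []) := by
  induction l generalizing d with
  | nil => simp [pvBounds, pvDepth]
  | cons q rest ih => simp [pvBounds, pvDepth, ih]

-- xs[a:] = xs[a:len(xs)] for 0 ≤ a
theorem pv_slice_to_end (cs : List Char) (a : Int) (ha : 0 ≤ a) :
    PySem.List.slice cs (some a) (some (cs.length : Int)) = PySem.List.slice cs (some a) none := by
  rw [PySem.List.slice_toNat cs ha (Int.natCast_nonneg _), PySem.List.slice_from cs ha]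
  apply List.take_of_length_le
  simp

-- ===== VERDICT (by name: the statement is the Claim_ definition above) =====
theorem line_split_spec : Claim_equal_line_split := by
  intro line _
  unfold Spec_line_split line_split line_split_alt
  rcases line.toList.eq_nil_or_concat with h | ⟨front, x, hfx⟩
  · simp [h]
  · set cs := line.toList with hcsdef
    have hfx' : cs = front ++ [x] := by simpa [List.concat_eq_append] using hfx
    have hne : cs.isEmpty = false := by simp [hfx']
    simp only [hne, Bool.false_eq_true, if_false]
    have hlen : (cs.length : Int) = (front.length : Int) + 1 := by simp [hfx']
    have henum : PySem.List.enumerate cs 0 =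
        PySem.List.enumerate front 0 ++ [((front.length : Int), x)] := by
      rw [hfx', PySem.List.enumerate_append]
      simp [PySem.List.enumerate]
    have hfront_ne : ∀ p ∈ PySem.List.enumerate front 0, p.1 ≠ (cs.length : Int) - 1 := by
      intro p hp
      rcases (PySem.List.mem_enumerate_iff front 0 p).1 hp with ⟨k, hk, rfl⟩
      simp only [hlen]; simp; omega
    have hfront_nonneg : ∀ p ∈ PySem.List.enumerate front 0, 0 ≤ p.1 := by
      intro p hp
      rcases (PySem.List.mem_enumerate_iff front 0 p).1 hp with ⟨k, hk, rfl⟩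
      simp
    set bsf := pvBounds 0 (PySem.List.enumerate front 0) with hbsf
    set lp := pvLastP (-1) bsf with hlp
    have hlp_ge : -1 ≤ lp := pvLastP_ge _ _ (by omega) (pvBounds_nonneg _ _ hfront_nonneg)
    rw [henum, List.foldl_append,
        pvA_fold cs (cs.length : Int) (PySem.List.enumerate front 0) 0 (-1) [] hfront_ne,
        pvB1_fold, pvBounds_append]
    simp only [List.foldl_cons, List.foldl_nil, pvStepA, List.nil_append]
    have hlast_eq : (((front.length : Int)) == (cs.length : Int) - 1) = true := by
      simp [hlen]
    by_cases hs : (PySem.Chars.isspace x && pvUpd (pvDepth 0 (PySem.List.enumerate front 0)) x == 0) = true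
    · simp only [hs, hlast_eq, if_pos, ← hbsf, ← hlp]
      rw [pvB2_fold, pvRender_append, pvLastP_append, ← hlp]
      have h1 : PySem.List.slice cs (some ((front.length : Int) + 1)) (some ((front.length : Int) + 1)) =
          PySem.List.slice cs (some ((front.length : Int) + 1)) none := by
        rw [← hlen, pv_slice_to_end cs _ (by omega)]
      simp [h1]
    · simp only [hs, hlast_eq, Bool.false_eq_true, if_false, if_pos, ← hbsf, ← hlp, List.append_nil]
      rw [pvB2_fold, ← hlp]
      have h1 : PySem.List.slice cs (some (lp + 1)) (some ((front.length : Int) + 1)) =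
          PySem.List.slice cs (some (lp + 1)) none := by
        rw [← hlen, pv_slice_to_end cs _ (by omega)]
      simp [h1]
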